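-- pv_equiv track=rewrite | github.com/ROTBOW/leetcode-results | leet_1716.py | totalMoney
-- ===== SOURCE A (Python) =====
-- def totalMoney(n: int) -> int:
--     money, week = 0, 0
--
--     while n > 0:
--         week += 1
--         for day in range(7):
--             n -= 1
--             money += day + week
--             if n <= 0: break
--
--     return money
-- ===== SOURCE B (Python) =====
-- def totalMoney(n: int) -> int:
--     # Closed form: w full weeks contribute 21*w + 7*T(w); the r leftover days
--     # of week w+1 contribute r*(w+1) + T(r-1), where T(x)=x*(x+1)//2.
--     if n <= 0:
--         return 0
--     w, r = divmod(n, 7)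
--     return 21 * w + 7 * (w * (w + 1) // 2) + r * (w + 1) + r * (r - 1) // 2
-- ===== Notes on version B (the rewrite author's own statement) =====
-- stated objective: faster
-- what changed: Replaced the day-by-day simulation loop with a closed-form arithmetic formula using w = n // 7 full weeks and r = n % 7 leftover days.
import Mathlib
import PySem

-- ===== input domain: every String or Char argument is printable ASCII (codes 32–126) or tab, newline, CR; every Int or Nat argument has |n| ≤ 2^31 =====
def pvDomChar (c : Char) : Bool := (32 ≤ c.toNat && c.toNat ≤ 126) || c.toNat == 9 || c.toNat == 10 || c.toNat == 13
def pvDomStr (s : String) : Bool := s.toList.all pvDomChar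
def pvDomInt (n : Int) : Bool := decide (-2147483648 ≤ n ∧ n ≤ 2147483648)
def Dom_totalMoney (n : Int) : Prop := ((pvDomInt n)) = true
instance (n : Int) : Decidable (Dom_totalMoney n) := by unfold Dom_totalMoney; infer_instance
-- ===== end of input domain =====

-- B replaces A's day-by-day simulation loop with a closed-form arithmetic formula (faster: O(1) vs O(n)).


-- ===== PORT A =====
-- inner 'for day in range(7)' with its early 'break' (returns the updated (n, money))
def pvInnerA : List Int → Int → Int → Int → Int × Int
  | [], n, money, _ => (n, money)
  | d :: ds, n, money, week =>
    let n' := n - 1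
    let money' := money + d + week
    if n' ≤ 0 then (n', money') else pvInnerA ds n' money' week

-- termination helpers for the outer while-loop (n strictly decreases each iteration)
theorem pvInnerA_fst_le (ds : List Int) (n money week : Int) :
    (pvInnerA ds n money week).1 ≤ n := by
  induction ds generalizing n money week with
  | nil => simp [pvInnerA]
  | cons d ds ih =>
    simp only [pvInnerA]
    split
    · omega
    · exact le_trans (ih _ _ _) (by omega)

theorem pvInnerA_fst_lt (d : Int) (ds : List Int) (n money week : Int) :
    (pvInnerA (d :: ds) n money week).1 < n := by
  simp only [pvInnerA]
  split
  · omega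
  · exact lt_of_le_of_lt (pvInnerA_fst_le ds _ _ _) (by omega)

-- the 'while n > 0' loop of A
def pvLoopA (n money week : Int) : Int :=
  if _h : n > 0 then
    match hp : pvInnerA (PySem.List.pyRange 0 7 1) n money (week + 1) with
    | (n', money') => pvLoopA n' money' (week + 1)
  else money
termination_by n.toNat
decreasing_by
  have hr : PySem.List.pyRange 0 7 1 = [0, 1, 2, 3, 4, 5, 6] := by decide
  have h2 := pvInnerA_fst_lt 0 [1, 2, 3, 4, 5, 6] n money (week + 1)
  rw [← hr] at h2
  rw [hp] at h2
  simp only at h2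
  omega

def totalMoney (n : Int) : Int := pvLoopA n 0 0

-- ===== PORT B =====
-- the closed-form payout for w full weeks and r leftover days (Source B's return expression)
def pvClosed (w r : Int) : Int :=
  21 * w + 7 * PySem.Int.floordiv (w * (w + 1)) 2 + r * (w + 1) +
    PySem.Int.floordiv (r * (r - 1)) 2

def totalMoney_alt (n : Int) : Int :=
  if n ≤ 0 then 0
  else pvClosed (PySem.Int.floordiv n 7) (PySem.Int.mod n 7)

-- ===== PRECONDITION & SPEC =====
def Spec_totalMoney (n : Int) (out : Int) : Prop := out = totalMoney_alt n
instance (n : Int) (out : Int) : Decidable (Spec_totalMoney n out) := by unfold Spec_totalMoney; infer_instance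

-- ===== CLAIM (what is proved, stated in full; the proofs are below) =====
def Claim_equal_totalMoney : Prop := ∀ (n : Int), Dom_totalMoney n → Spec_totalMoney n (totalMoney n)

-- ===== LEMMAS AND PROOFS =====

theorem pvTri_succ (a : Int) :
    PySem.Int.floordiv (a * (a + 1)) 2 = PySem.Int.floordiv ((a - 1) * a) 2 + a := by
  rw [PySem.Int.floordiv_eq_ediv_of_pos (by omega : (0:Int) < 2),
      PySem.Int.floordiv_eq_ediv_of_pos (by omega : (0:Int) < 2)]
  obtain ⟨k, hk⟩ := Int.even_mul_succ_self (a - 1)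
  have h1 : (a - 1) * a = 2 * k := by linear_combination hk
  have h2 : a * (a + 1) = 2 * k + 2 * a := by linear_combination h1
  rw [h1, h2]; omega

theorem pvAlt_step (n : Int) (h : 8 ≤ n) :
    totalMoney_alt n = n + 21 + totalMoney_alt (n - 7) := by
  unfold totalMoney_alt pvClosed
  rw [if_neg (by omega), if_neg (by omega)]
  rw [PySem.Int.floordiv_eq_ediv_of_pos (by omega : (0:Int) < 7),
      PySem.Int.floordiv_eq_ediv_of_pos (by omega : (0:Int) < 7),
      PySem.Int.mod_eq_emod_of_pos (by omega : (0:Int) < 7),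
      PySem.Int.mod_eq_emod_of_pos (by omega : (0:Int) < 7)]
  have hw : (n - 7) / 7 = n / 7 - 1 := by omega
  have hrr : (n - 7) % 7 = n % 7 := by omega
  rw [hw, hrr]
  set w := n / 7 with hwdef
  set r := n % 7 with hrdef
  have hn : 7 * w + r = n := by omega
  have e1 : (w - 1) * (w - 1 + 1) = (w - 1) * w := by ring
  rw [e1, pvTri_succ w]
  linear_combination hn

-- one outer iteration when at least 7 days remain: consumes 7 days, adds a full week
theorem pvInnerA_run7 (n money week : Int) (h : 7 ≤ n) :
    pvInnerA [0, 1, 2, 3, 4, 5, 6] n money week = (n - 7, money + 21 + 7 * week) := by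
  simp only [pvInnerA]
  rw [if_neg (by omega), if_neg (by omega), if_neg (by omega), if_neg (by omega),
      if_neg (by omega), if_neg (by omega)]
  split <;> · refine Prod.ext (by omega) (by ring)

theorem pvRange7 : PySem.List.pyRange 0 7 1 = [0, 1, 2, 3, 4, 5, 6] := by decide

theorem pvLoop_eq (k : Nat) : ∀ (n money week : Int), 0 < n → n.toNat ≤ k →
    pvLoopA n money week = money + n * week + totalMoney_alt n := by
  induction k with
  | zero => intro n _ _ h hk; omega
  | succ k ih =>
    intro n money week h hk
    rw [pvLoopA, dif_pos h]
    simp only [pvRange7]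
    by_cases h7 : 8 ≤ n
    · rw [pvInnerA_run7 n money (week + 1) (by omega)]
      have hrec := ih (n - 7) (money + 21 + 7 * (week + 1)) (week + 1) (by omega) (by omega)
      rw [hrec, pvAlt_step n h7]
      ring
    · -- 1 ≤ n ≤ 7 : the inner loop breaks after exactly n days and the loop ends
      interval_cases n <;>
        simp only [pvInnerA] <;> norm_num <;> rw [pvLoopA] <;> norm_num <;>
        first
          | (rw [(show totalMoney_alt 1 = 1 from by decide)]; ring)
          | (rw [(show totalMoney_alt 2 = 3 from by decide)]; ring)
          | (rw [(show totalMoney_alt 3 = 6 from by decide)]; ring)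
          | (rw [(show totalMoney_alt 4 = 10 from by decide)]; ring)
          | (rw [(show totalMoney_alt 5 = 15 from by decide)]; ring)
          | (rw [(show totalMoney_alt 6 = 21 from by decide)]; ring)
          | (rw [(show totalMoney_alt 7 = 28 from by decide)]; ring)

-- ===== VERDICT (by name: the statement is the Claim_ definition above) =====
theorem totalMoney_spec : Claim_equal_totalMoney := by
  intro n _
  unfold Spec_totalMoney totalMoney
  by_cases h : 0 < n
  · rw [pvLoop_eq n.toNat n 0 0 h (by omega)]; ring
  · rw [pvLoopA, dif_neg h]
    unfold totalMoney_alt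
    rw [if_pos (by omega)]
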